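-- pv_equiv track=rewrite | github.com/sach1nkhatri/DSA-Assignmenrt-Codes | find_classroom_with_most_classes.py | find_classroom_with_most_classes
-- ===== SOURCE A (Python) =====
-- import heapq
--
-- def find_classroom_with_most_classes(n, classes):
--     # Step 1: Sort the classes by their start time, and by duration in descending order if start times are the same
--     classes.sort(key=lambda x: (x[0], -(x[1] - x[0])))
--
--     # Step 2: Initialize a priority queue (min-heap) to manage room availability and an array to track the number of classes per room
--     room_heap = []
--     class_count = [0] * n
--
--     for cls in classes:
--         start, end = cls
--
--         # Step 3: Free up rooms that are available by the current class's start time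
--         while room_heap and room_heap[0][0] <= start:
--             heapq.heappop(room_heap)
--
--         # Step 4: Assign the current class to an available room
--         if len(room_heap) < n:
--             # If a room is available, assign the class to it
--             room_index = len(room_heap)
--             heapq.heappush(room_heap, (end, room_index))
--             class_count[room_index] += 1
--         else:
--             # Delay the class and allocate it to the earliest available room
--             earliest_end_time, room_index = heapq.heappop(room_heap)
--             heapq.heappush(room_heap, (earliest_end_time + (end - start), room_index))
--             class_count[room_index] += 1
--
--     # Step 5: Identify the room that hosted the most classes
--     max_classes = max(class_count)
--     for i in range(n):
--         if class_count[i] == max_classes: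
--             return i
-- ===== SOURCE B (Python) =====
-- def find_classroom_with_most_classes(n, classes):
--     # Same in-place sort as A (side effect on `classes` preserved).
--     classes.sort(key=lambda x: (x[0], -(x[1] - x[0])))
--
--     occupied = []          # plain (unordered) list of (end_time, room_index)
--     class_count = [0] * n
--
--     for start, end in classes:
--         # free every room whose class has finished by `start`
--         occupied = [r for r in occupied if r[0] > start]
--
--         if len(occupied) < n:
--             room_index = len(occupied)
--             occupied.append((end, room_index))
--         else:
--             earliest = min(occupied)            # least (end, room_index), linear scan
--             occupied.remove(earliest)
--             room_index = earliest[1]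
--             occupied.append((earliest[0] + (end - start), room_index))
--         class_count[room_index] += 1
--
--     return class_count.index(max(class_count))
-- ===== Notes on version B (the rewrite author's own statement) =====
-- stated objective: simpler
-- what changed: Drops heapq entirely: occupied rooms live in a plain unordered list that is freed with one filter pass per class and whose earliest room is found by a linear min scan, and the final answer is class_count.index(max(class_count)) instead of a max plus an index loop.
import Mathlib
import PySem

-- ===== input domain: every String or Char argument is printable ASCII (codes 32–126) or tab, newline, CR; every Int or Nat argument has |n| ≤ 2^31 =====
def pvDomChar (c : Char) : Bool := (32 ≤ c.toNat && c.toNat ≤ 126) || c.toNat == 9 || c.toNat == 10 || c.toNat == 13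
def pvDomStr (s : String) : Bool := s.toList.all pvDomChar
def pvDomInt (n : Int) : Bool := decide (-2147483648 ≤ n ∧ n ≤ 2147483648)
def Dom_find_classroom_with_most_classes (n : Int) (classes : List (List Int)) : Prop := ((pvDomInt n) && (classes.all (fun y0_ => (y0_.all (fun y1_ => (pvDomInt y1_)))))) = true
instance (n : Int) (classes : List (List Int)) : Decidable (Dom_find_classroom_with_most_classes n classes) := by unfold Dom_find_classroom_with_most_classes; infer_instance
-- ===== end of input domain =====

-- B drops heapq: occupied rooms are a plain unordered list (one filter pass frees rooms, a linear
-- min scan picks the room to reuse) and the answer is class_count.index(max(class_count)).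
-- Both versions sort `classes` in place (same side effect); the theorems are about the return value.


-- ===== PORT A =====
-- heapq is modeled as the Python heap list kept sorted ascending in (end, idx) lex order:
-- exact for every operation A performs on it (len, heap[0], heappop = pop-min, heappush).
def pvHeapLe (a b : Int × Int) : Bool :=
  decide (a.1 < b.1) || (decide (a.1 = b.1) && decide (a.2 ≤ b.2))

def pvHeappush (h : List (Int × Int)) (x : Int × Int) : List (Int × Int) :=
  match h with
  | [] => [x]
  | y :: ys => if pvHeapLe x y then x :: y :: ys else y :: pvHeappush ys x

-- `while room_heap and room_heap[0][0] <= start: heappop(room_heap)`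
def pvFree (start : Int) : List (Int × Int) → List (Int × Int)
  | [] => []
  | (e, i) :: rest => if e ≤ start then pvFree start rest else (e, i) :: rest

-- `class_count[i] += 1` (i is a valid non-negative index whenever it happens)
def pvIncr (c : List Int) (i : Int) : List Int := c.set i.toNat (c.getD i.toNat 0 + 1)

def pvStepA (n : Int) (st : List (Int × Int) × List Int) (cls : List Int) :
    List (Int × Int) × List Int :=
  let start := PySem.List.pyGetD cls 0 0
  let stop := PySem.List.pyGetD cls 1 0
  let heap := pvFree start st.1
  if (heap.length : Int) < n then
    (pvHeappush heap (stop, (heap.length : Int)), pvIncr st.2 (heap.length : Int))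
  else
    match heap with
    | [] => (heap, st.2)  -- heappop of [] raises in Python; only reachable when n ≤ 0, outside Pre_
    | (e, i) :: rest => (pvHeappush rest (e + (stop - start), i), pvIncr st.2 i)

-- `for i in range(n): if class_count[i] == max_classes: return i`
def pvFindFirst (c : List Int) (m : Int) : List Int → Option Int
  | [] => none
  | i :: rest => if PySem.List.pyGetD c i 0 == m then some i else pvFindFirst c m rest

def find_classroom_with_most_classes (n : Int) (classes : List (List Int)) : Int :=
  let sc := PySem.List.sorted2 classes (fun x => PySem.List.pyGetD x 0 0)
      (fun x => -(PySem.List.pyGetD x 1 0 - PySem.List.pyGetD x 0 0))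
  let st := sc.foldl (pvStepA n) ([], List.replicate n.toNat 0)
  match PySem.List.max? st.2 (fun y => y) with
  | none => 0  -- max([]) raises in Python; only when n ≤ 0, outside Pre_
  | some m => (pvFindFirst st.2 m (PySem.List.pyRange 0 n 1)).getD 0

-- ===== PORT B =====
def pvStepB (n : Int) (st : List (Int × Int) × List Int) (cls : List Int) :
    List (Int × Int) × List Int :=
  let start := PySem.List.pyGetD cls 0 0
  let stop := PySem.List.pyGetD cls 1 0
  let occ := st.1.filter (fun r => decide (start < r.1))
  if (occ.length : Int) < n then
    (occ ++ [(stop, (occ.length : Int))], pvIncr st.2 (occ.length : Int))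
  else
    match PySem.List.min2? occ (fun r => r.1) (fun r => r.2) with
    | none => (occ, st.2)  -- min([]) raises in Python; only reachable when n ≤ 0, outside Pre_
    | some er =>
        (((PySem.List.remove? occ er).getD occ) ++ [(er.1 + (stop - start), er.2)],
         pvIncr st.2 er.2)

def find_classroom_with_most_classes_alt (n : Int) (classes : List (List Int)) : Int :=
  let sc := PySem.List.sorted2 classes (fun x => PySem.List.pyGetD x 0 0)
      (fun x => -(PySem.List.pyGetD x 1 0 - PySem.List.pyGetD x 0 0))
  let st := sc.foldl (pvStepB n) ([], List.replicate n.toNat 0)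
  match PySem.List.max? st.2 (fun y => y) with
  | none => 0
  | some m =>
    match PySem.List.index? st.2 m with
    | some k => (k : Int)
    | none => 0

-- ===== PRECONDITION & SPEC =====
-- Pre_ excludes exactly the inputs where A raises: n ≤ 0 (max/heappop on an empty sequence)
-- and classes whose elements do not have exactly 2 entries (IndexError/unpacking ValueError).
def Pre_find_classroom_with_most_classes (n : Int) (classes : List (List Int)) : Prop :=
  1 ≤ n ∧ ∀ c ∈ classes, c.length = 2
instance (n : Int) (classes : List (List Int)) : Decidable (Pre_find_classroom_with_most_classes n classes) := by unfold Pre_find_classroom_with_most_classes; infer_instance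

def pvWitness_find_classroom_with_most_classes : Int × List (List Int) :=
  (2, [[0, 3], [1, 4], [2, 6]])

def Spec_find_classroom_with_most_classes (n : Int) (classes : List (List Int)) (out : Int) : Prop := out = find_classroom_with_most_classes_alt n classes
instance (n : Int) (classes : List (List Int)) (out : Int) : Decidable (Spec_find_classroom_with_most_classes n classes out) := by unfold Spec_find_classroom_with_most_classes; infer_instance

-- ===== CLAIM (what is proved, stated in full; the proofs are below) =====
def Claim_equal_find_classroom_with_most_classes : Prop := ∀ (n : Int) (classes : List (List Int)), Dom_find_classroom_with_most_classes n classes → Pre_find_classroom_with_most_classes n classes → Spec_find_classroom_with_most_classes n classes (find_classroom_with_most_classes n classes)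

-- ===== LEMMAS AND PROOFS =====

-- lex order on (end, idx) pairs, as Python compares the tuples
def pvLexLe (a b : Int × Int) : Prop := a.1 < b.1 ∨ (a.1 = b.1 ∧ a.2 ≤ b.2)
def pvLexLt (a b : Int × Int) : Prop := a.1 < b.1 ∨ (a.1 = b.1 ∧ a.2 < b.2)

theorem pvHeapLe_iff (a b : Int × Int) : pvHeapLe a b = true ↔ pvLexLe a b := by
  unfold pvHeapLe pvLexLe
  simp only [Bool.or_eq_true, Bool.and_eq_true, decide_eq_true_eq]

theorem pvLexLe_trans {a b c : Int × Int} (h1 : pvLexLe a b) (h2 : pvLexLe b c) :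
    pvLexLe a c := by
  unfold pvLexLe at *; omega

-- Step 3: on a lex-sorted heap, popping while the head has end ≤ start is a filter
theorem pvFree_eq_filter (s : Int) :
    ∀ (H : List (Int × Int)), H.Pairwise pvLexLe →
      pvFree s H = H.filter (fun r => decide (s < r.1)) := by
  intro H
  induction H with
  | nil => intro _; rfl
  | cons h rest ih =>
    intro hp
    obtain ⟨e, i⟩ := h
    rw [List.pairwise_cons] at hp
    by_cases he : e ≤ s
    · have hns : ¬ (s < e) := by omega
      simp [pvFree, he, hns, ih hp.2]
    · have hs : s < e := by omega
      have hall : ∀ r ∈ rest, decide (s < r.1) = true := by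
        intro r hr
        have := hp.1 r hr
        unfold pvLexLe at this
        simp only [decide_eq_true_eq]
        omega
      simp [pvFree, he, hs, List.filter_eq_self.mpr hall]

-- Step 4: heappush = sorted insert; a permutation of cons, and preserves sortedness
theorem pvHeappush_perm (x : Int × Int) :
    ∀ (h : List (Int × Int)), (pvHeappush h x).Perm (x :: h) := by
  intro h
  induction h with
  | nil => simp [pvHeappush]
  | cons y ys ih =>
    by_cases hxy : pvHeapLe x y
    · simp [pvHeappush, hxy]
    · simp only [pvHeappush, hxy, Bool.false_eq_true, if_false]
      exact ((ih.cons y).trans (List.Perm.swap x y ys))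

theorem pvHeappush_pairwise (x : Int × Int) :
    ∀ (h : List (Int × Int)), h.Pairwise pvLexLe → (pvHeappush h x).Pairwise pvLexLe := by
  intro h
  induction h with
  | nil => intro _; simp [pvHeappush]
  | cons y ys ih =>
    intro hp
    rw [List.pairwise_cons] at hp
    by_cases hxy : pvHeapLe x y
    · have hxyle : pvLexLe x y := (pvHeapLe_iff x y).1 hxy
      simp only [pvHeappush, hxy, if_true]
      rw [List.pairwise_cons]
      refine ⟨?_, List.pairwise_cons.mpr hp⟩
      intro z hz
      rcases List.mem_cons.1 hz with hz | hz
      · exact hz ▸ hxyle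
      · exact pvLexLe_trans hxyle (hp.1 z hz)
    · have hyx : pvLexLe y x := by
        have hnot : ¬ pvLexLe x y := fun hc => hxy ((pvHeapLe_iff x y).2 hc)
        unfold pvLexLe at *; omega
      simp only [pvHeappush, hxy, Bool.false_eq_true, if_false]
      rw [List.pairwise_cons]
      refine ⟨?_, ih hp.2⟩
      intro z hz
      have hz' := (pvHeappush_perm x ys).mem_iff.1 hz
      rcases List.mem_cons.1 hz' with hz' | hz'
      · exact hz' ▸ hyx
      · exact hp.1 z hz'

-- min(occupied): min2? returns an element of the list that nothing is strictly lex-below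
def pvMinStep (acc : Option (Int × Int)) (x : Int × Int) : Option (Int × Int) :=
  match acc with
  | none => some x
  | some mm =>
    if (decide (x.1 < mm.1) || !decide (mm.1 < x.1) && decide (x.2 < mm.2)) = true
    then some x else some mm

theorem pvMin2_eq_foldl (l : List (Int × Int)) :
    PySem.List.min2? l (fun r => r.1) (fun r => r.2) = l.foldl pvMinStep none := by
  unfold PySem.List.min2?
  refine List.foldl_ext _ _ none ?_
  intro acc x _
  cases acc <;> rfl

theorem pvMinAux :
    ∀ (l : List (Int × Int)) (m : Int × Int),
      ∃ m', List.foldl pvMinStep (some m) l = some m' ∧ (m' = m ∨ m' ∈ l) ∧ pvLexLe m' m ∧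
          ∀ y ∈ l, ¬ pvLexLt y m' := by
  intro l
  induction l with
  | nil =>
    intro m
    refine ⟨m, rfl, Or.inl rfl, ?_, ?_⟩
    · unfold pvLexLe; omega
    · intro y hy; exact absurd hy (by simp)
  | cons x xs ih =>
    intro m
    by_cases hlt : (decide (x.1 < m.1) || !decide (m.1 < x.1) && decide (x.2 < m.2)) = true
    · have hxm : pvLexLt x m := by
        simp only [Bool.or_eq_true, Bool.and_eq_true, Bool.not_eq_eq_eq_not, Bool.not_true,
          decide_eq_true_eq, decide_eq_false_iff_not] at hlt
        unfold pvLexLt; omega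
      obtain ⟨m', hfold, hmem, hle, hmin⟩ := ih x
      refine ⟨m', ?_, ?_, ?_, ?_⟩
      · simp only [List.foldl_cons, pvMinStep, hlt, if_true]; exact hfold
      · rcases hmem with h | h
        · exact Or.inr (h ▸ List.mem_cons_self)
        · exact Or.inr (List.mem_cons_of_mem x h)
      · have hxmle : pvLexLe x m := by unfold pvLexLt at hxm; unfold pvLexLe; omega
        exact pvLexLe_trans hle hxmle
      · intro y hy
        rcases List.mem_cons.1 hy with hy | hy
        · subst hy; unfold pvLexLe at hle; unfold pvLexLt; omega
        · exact hmin y hy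
    · have hxm : ¬ pvLexLt x m := by
        simp only [Bool.or_eq_true, Bool.and_eq_true, Bool.not_eq_eq_eq_not, Bool.not_true,
          decide_eq_true_eq, decide_eq_false_iff_not] at hlt
        unfold pvLexLt; omega
      obtain ⟨m', hfold, hmem, hle, hmin⟩ := ih m
      refine ⟨m', ?_, ?_, hle, ?_⟩
      · simp only [List.foldl_cons, pvMinStep, hlt, Bool.false_eq_true, if_false]; exact hfold
      · rcases hmem with h | h
        · exact Or.inl h
        · exact Or.inr (List.mem_cons_of_mem x h)
      · intro y hy
        rcases List.mem_cons.1 hy with hy | hy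
        · subst hy; unfold pvLexLe at hle; unfold pvLexLt at *; omega
        · exact hmin y hy

theorem pvMin2_spec (l : List (Int × Int)) (hl : l ≠ []) :
    ∃ m, PySem.List.min2? l (fun r => r.1) (fun r => r.2) = some m ∧ m ∈ l ∧
      ∀ y ∈ l, ¬ pvLexLt y m := by
  cases l with
  | nil => exact absurd rfl hl
  | cons x xs =>
    obtain ⟨m', hfold, hmem, _, hmin⟩ := pvMinAux xs x
    refine ⟨m', ?_, ?_, ?_⟩
    · rw [pvMin2_eq_foldl, List.foldl_cons]
      exact hfold
    · rcases hmem with h | h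
      · exact h ▸ List.mem_cons_self
      · exact List.mem_cons_of_mem x h
    · intro y hy
      rcases List.mem_cons.1 hy with hy | hy
      · subst hy
        rcases pvMinAux xs y with ⟨m'', hfold', hmem', hle', _⟩
        rw [hfold] at hfold'
        cases hfold'
        unfold pvLexLe at hle'; unfold pvLexLt; omega
      · exact hmin y hy

-- one loop iteration: A's (heap, counts) and B's (occupied, counts) stay related
theorem pvStep_rel (n : Int) (hn : 1 ≤ n) (cls : List Int) (H L : List (Int × Int))
    (C : List Int) (hperm : H.Perm L) (hsort : H.Pairwise pvLexLe) :
    (pvStepA n (H, C) cls).1.Perm (pvStepB n (L, C) cls).1 ∧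
    (pvStepA n (H, C) cls).1.Pairwise pvLexLe ∧
    (pvStepA n (H, C) cls).2 = (pvStepB n (L, C) cls).2 := by
  have hfree : pvFree (PySem.List.pyGetD cls 0 0) H
      = H.filter (fun r => decide (PySem.List.pyGetD cls 0 0 < r.1)) :=
    pvFree_eq_filter _ H hsort
  simp only [pvStepA, pvStepB, hfree]
  set start := PySem.List.pyGetD cls 0 0 with hstart
  set stop := PySem.List.pyGetD cls 1 0 with hstop
  set F := H.filter (fun r => decide (start < r.1)) with hF
  set G := L.filter (fun r => decide (start < r.1)) with hG
  have hpf : F.Perm G := hperm.filter _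
  have hsf : F.Pairwise pvLexLe := List.Pairwise.sublist List.filter_sublist hsort
  have hlenf : F.length = G.length := hpf.length_eq
  by_cases hcap : (F.length : Int) < n
  · have hcap' : (G.length : Int) < n := by omega
    simp only [hcap, hcap', if_true]
    refine ⟨?_, ?_, ?_⟩
    · rw [← hlenf]
      exact (pvHeappush_perm _ F).trans ((hpf.cons _).trans (List.perm_append_singleton _ G).symm)
    · exact pvHeappush_pairwise _ F hsf
    · rw [hlenf]
  · have hcap' : ¬ (G.length : Int) < n := by omega
    simp only [hcap, hcap', if_false]
    have hGne : G ≠ [] := by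
      intro h
      apply hcap
      have hF0 : F.length = 0 := by rw [hlenf, h, List.length_nil]
      omega
    obtain ⟨m, hm, hmmem, hmmin⟩ := pvMin2_spec G hGne
    cases hFc : F with
    | nil =>
      exfalso
      rw [hFc, List.length_nil] at hlenf
      exact hGne (List.length_eq_zero_iff.1 hlenf.symm)
    | cons h0 rest =>
      obtain ⟨e, i⟩ := h0
      rw [hFc] at hpf hsf
      rw [List.pairwise_cons] at hsf
      -- the first element of the sorted heap is the value min() finds
      have hmeq : m = (e, i) := by
        have h1 : pvLexLe (e, i) m := by
          rcases List.mem_cons.1 (hpf.symm.mem_iff.1 hmmem) with h | h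
          · rw [h]; unfold pvLexLe; omega
          · exact hsf.1 m h
        have h2 : ¬ pvLexLt (e, i) m := hmmin (e, i) (hpf.mem_iff.1 List.mem_cons_self)
        unfold pvLexLe at h1; unfold pvLexLt at h2
        have hcomp : m.1 = e ∧ m.2 = i := by simp at h1 h2 ⊢; omega
        exact Prod.ext hcomp.1 hcomp.2
      rw [hmeq] at hm hmmem
      have hrm : PySem.List.remove? G (e, i) = some (G.erase (e, i)) :=
        PySem.List.remove?_eq_some_erase G (e, i) hmmem
      simp only [hm, hrm, Option.getD_some]
      have herase : rest.Perm (G.erase (e, i)) := by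
        have hpe := hpf.erase (e, i)
        rwa [List.erase_cons_head] at hpe
      refine ⟨?_, ?_, trivial⟩
      · exact (pvHeappush_perm _ rest).trans
          ((herase.cons _).trans (List.perm_append_singleton _ (G.erase (e, i))).symm)
      · exact pvHeappush_pairwise _ rest hsf.2

-- the whole loop: counts agree (and the room lists stay related)
theorem pvFold_rel (n : Int) (hn : 1 ≤ n) :
    ∀ (sc : List (List Int)) (H L : List (Int × Int)) (C : List Int),
      H.Perm L → H.Pairwise pvLexLe →
      (sc.foldl (pvStepA n) (H, C)).2 = (sc.foldl (pvStepB n) (L, C)).2 := by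
  intro sc
  induction sc with
  | nil => intro H L C _ _; rfl
  | cons cls rest ih =>
    intro H L C hperm hsort
    obtain ⟨h1, h2, h3⟩ := pvStep_rel n hn cls H L C hperm hsort
    simp only [List.foldl_cons]
    have hA : pvStepA n (H, C) cls = ((pvStepA n (H, C) cls).1, (pvStepA n (H, C) cls).2) := rfl
    have hB : pvStepB n (L, C) cls = ((pvStepB n (L, C) cls).1, (pvStepB n (L, C) cls).2) := rfl
    rw [hA, hB, ← h3]
    exact ih _ _ _ h1 h2

-- counts keep their length through the loop
theorem pvIncr_length (c : List Int) (i : Int) : (pvIncr c i).length = c.length := by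
  simp [pvIncr]

theorem pvStepA_len (n : Int) (st : List (Int × Int) × List Int) (cls : List Int) :
    (pvStepA n st cls).2.length = st.2.length := by
  simp only [pvStepA]
  split
  · exact pvIncr_length _ _
  · split
    · rfl
    · exact pvIncr_length _ _

theorem pvFoldA_len (n : Int) :
    ∀ (sc : List (List Int)) (st : List (Int × Int) × List Int),
      (sc.foldl (pvStepA n) st).2.length = st.2.length := by
  intro sc
  induction sc with
  | nil => intro st; rfl
  | cons cls rest ih => intro st; rw [List.foldl_cons, ih, pvStepA_len]

-- A's final range scan is list.index of the max
theorem pvFindFirst_eq (m : Int) :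
    ∀ (tail : List Int) (a : Nat) (xs : List Int), xs.drop a = tail →
      pvFindFirst xs m (PySem.List.pyRange (a : Int) (xs.length : Int) 1) =
        (PySem.List.index? tail m).map (fun k => ((a + k : Nat) : Int)) := by
  intro tail
  induction tail with
  | nil =>
    intro a xs hdrop
    have hle : xs.length ≤ a := List.drop_eq_nil_iff.1 hdrop
    rw [PySem.List.pyRange_one_eq_nil (by exact_mod_cast hle)]
    simp [pvFindFirst, PySem.List.index?]
  | cons t ts ih =>
    intro a xs hdrop
    have hlt : a < xs.length := by
      by_contra h
      rw [List.drop_eq_nil_iff.2 (by omega)] at hdrop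
      exact List.cons_ne_nil t ts hdrop.symm
    have hget : xs[a]? = some t := by
      have h0 : (xs.drop a)[0]? = some t := by rw [hdrop]; rfl
      rwa [List.getElem?_drop, Nat.add_zero] at h0
    have hgetD : PySem.List.pyGetD xs (a : Int) 0 = t := by
      rw [PySem.List.pyGetD_of_nonneg xs 0 (by positivity), Int.toNat_natCast,
        List.getD_eq_getElem?_getD, hget]
      rfl
    rw [PySem.List.pyRange_one_cons (by exact_mod_cast hlt)]
    simp only [pvFindFirst, hgetD]
    by_cases htm : t = m
    · subst htm
      rw [if_pos (by simp), PySem.List.index?_cons_self]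
      simp
    · have hts : xs.drop (a + 1) = ts := by
        have : (xs.drop a).drop 1 = ts := by rw [hdrop]; rfl
        rwa [List.drop_drop] at this
      have hcast : ((a : Int) + 1) = ((a + 1 : Nat) : Int) := by push_cast; ring
      rw [if_neg (by simp [htm]), hcast, ih (a + 1) xs hts,
        PySem.List.index?_cons_of_ne ts htm]
      cases PySem.List.index? ts m with
      | none => rfl
      | some k =>
        simp only [Option.map_some]
        congr 1
        push_cast
        ring

-- first index with the max count: A's range scan = list.index
theorem pvIdx_eq (n : Int) (m : Int) (c : List Int) (hcn : (c.length : Int) = n) :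
    pvFindFirst c m (PySem.List.pyRange 0 n 1) =
      (PySem.List.index? c m).map (fun k => (k : Int)) := by
  have h0 : PySem.List.pyRange 0 n 1
      = PySem.List.pyRange (((0 : Nat) : Int)) ((c.length : Int)) 1 := by
    rw [hcn]; norm_num
  rw [h0, pvFindFirst_eq m c 0 c (by simp)]
  cases PySem.List.index? c m with
  | none => rfl
  | some k => simp

-- ===== VERDICT (by name: the statement is the Claim_ definition above) =====
theorem find_classroom_with_most_classes_spec : Claim_equal_find_classroom_with_most_classes := by
  intro n classes _ hpre
  obtain ⟨hn, _⟩ := hpre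
  unfold Spec_find_classroom_with_most_classes
  simp only [find_classroom_with_most_classes, find_classroom_with_most_classes_alt]
  have hcounts := pvFold_rel n hn
      (PySem.List.sorted2 classes (fun x => PySem.List.pyGetD x 0 0)
        (fun x => -(PySem.List.pyGetD x 1 0 - PySem.List.pyGetD x 0 0)))
      [] [] (List.replicate n.toNat 0) (List.Perm.refl []) List.Pairwise.nil
  have hlen := pvFoldA_len n
      (PySem.List.sorted2 classes (fun x => PySem.List.pyGetD x 0 0)
        (fun x => -(PySem.List.pyGetD x 1 0 - PySem.List.pyGetD x 0 0)))
      ([], List.replicate n.toNat 0)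
  simp only [List.length_replicate] at hlen
  rw [← hcounts]
  set c := (List.foldl (pvStepA n) ([], List.replicate n.toNat 0)
      (PySem.List.sorted2 classes (fun x => PySem.List.pyGetD x 0 0)
        (fun x => -(PySem.List.pyGetD x 1 0 - PySem.List.pyGetD x 0 0)))).2 with hc
  have hcn : (c.length : Int) = n := by omega
  cases hmax : PySem.List.max? c (fun y => y) with
  | none => rfl
  | some m =>
    have hmem : m ∈ c := PySem.List.max?_mem hmax
    have hidx : (PySem.List.index? c m).isSome = true :=
      (PySem.List.index?_isSome_iff c m).2 hmem
    cases hk : PySem.List.index? c m with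
    | none => rw [hk] at hidx; exact absurd hidx (by simp)
    | some k =>
      simp only [pvIdx_eq n m c hcn, hk]
      simp
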